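-- pv_equiv track=rewrite | github.com/FranLucca/TPFINALPROGRAMACION | generales/nonogramas.py | calcular_pistas_columnas
-- ===== SOURCE A (Python) =====
-- def calcular_pistas_columnas(matriz: list[list[int]]) -> list[list[int]]:
--     """
--     Calcula las pistas numéricas para cada columna del nonograma.
--     Cada pista indica la cantidad de celdas consecutivas con valor 1.
--
--     Parámetros:
--         matriz (list[list[int]]): Matriz de enteros (0 o 1) que representa el nonograma completo.
--
--     Retorna:
--         list[list[int]]: Lista donde cada elemento corresponde a una columna,
--         conteniendo los bloques consecutivos de 1 encontrados.
--         Ejemplo: si una columna es [1,1,0,1], la pista será [2,1].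
--     """
--     pistas = []
--     cantidad_columnas = len(matriz[0])
--     cantidad_filas = len(matriz)
--     for indice_columna in range(cantidad_columnas):
--         conteos = []
--         contador = 0
--         for indice_fila in range(cantidad_filas):
--             valor = matriz[indice_fila][indice_columna]
--             if valor == 1:
--                 contador = contador + 1
--             else:
--                 if contador > 0:
--                     conteos.append(contador)
--                     contador = 0
--         if contador > 0:
--             conteos.append(contador)
--         if len(conteos) == 0:
--             conteos.append(0)
--         pistas.append(conteos)
--     return pistas
-- ===== SOURCE B (Python) =====
-- def calcular_pistas_columnas(matriz: list[list[int]]) -> list[list[int]]: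
--     """B: transpose once with zip(*matriz), then extract each column's runs of 1s
--     with a two-pointer scan instead of per-cell counter bookkeeping."""
--     pistas = []
--     for col in zip(*matriz):
--         bloques = []
--         i, n = 0, len(col)
--         while i < n:
--             if col[i] == 1:
--                 j = i
--                 while j < n and col[j] == 1:
--                     j += 1
--                 bloques.append(j - i)
--                 i = j
--             else:
--                 i += 1
--         pistas.append(bloques if bloques else [0])
--     return pistas
-- ===== Notes on version B (the rewrite author's own statement) =====
-- stated objective: alternative
-- what changed: B transposes the matrix once with zip(*matriz) and extracts each column's 1-runs with a two-pointer scan (find a run's end, record its length, jump past it), instead of A's nested index loops over (column, row) with a running counter and a post-loop flush.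
import Mathlib
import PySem

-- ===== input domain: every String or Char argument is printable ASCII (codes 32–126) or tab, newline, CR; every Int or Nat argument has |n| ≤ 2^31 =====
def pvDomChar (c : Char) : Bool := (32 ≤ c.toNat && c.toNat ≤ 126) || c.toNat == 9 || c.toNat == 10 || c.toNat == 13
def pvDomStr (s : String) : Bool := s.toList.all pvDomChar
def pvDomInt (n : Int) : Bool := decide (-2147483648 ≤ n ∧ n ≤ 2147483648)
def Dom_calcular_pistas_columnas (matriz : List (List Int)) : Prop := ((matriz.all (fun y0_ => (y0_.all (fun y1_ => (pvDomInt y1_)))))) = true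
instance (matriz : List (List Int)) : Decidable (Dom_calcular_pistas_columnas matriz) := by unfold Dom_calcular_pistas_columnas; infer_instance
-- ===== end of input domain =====

-- B transposes once and reads each column's runs of 1s with a two-pointer scan,
-- instead of A's nested (column, row) index loops with a running counter; same cost, different structure.

-- ===== PORT A =====
-- literal transliteration of A; pyGetD's defaults are never reached under Pre_ (in-range indices)
def calcular_pistas_columnas (matriz : List (List Int)) : List (List Int) :=
  let cantidad_columnas : Int := (PySem.List.pyGetD matriz 0 []).length
  let cantidad_filas : Int := matriz.length
  (PySem.List.pyRange 0 cantidad_columnas 1).foldl (fun pistas indice_columna =>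
    let st :=
      (PySem.List.pyRange 0 cantidad_filas 1).foldl (fun (st : List Int × Int) indice_fila =>
        let valor := PySem.List.pyGetD (PySem.List.pyGetD matriz indice_fila []) indice_columna 0
        if valor = 1 then (st.1, st.2 + 1)
        else if st.2 > 0 then (st.1 ++ [st.2], 0) else st) ([], 0)
    let conteos := if st.2 > 0 then st.1 ++ [st.2] else st.1
    let conteos := if conteos.length = 0 then conteos ++ [0] else conteos
    pistas ++ [conteos]) []

-- ===== PORT B =====
-- zip(*matriz): columns truncated to the shortest row; [] when matriz is empty
def pvZipStar (matriz : List (List Int)) : List (List Int) :=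
  match matriz with
  | [] => []
  | r :: rs =>
    let n := rs.foldl (fun m row => min m row.length) r.length
    (List.range n).map (fun j => (r :: rs).map (fun row => row.getD j 0))

-- inner while of B: advance j past the run of 1s
def pvRunEnd (col : List Int) (n j : Nat) : Nat :=
  if j < n ∧ col.getD j 0 = 1 then pvRunEnd col n (j + 1) else j
  termination_by n - j
  decreasing_by omega

-- used by pvLoopB's termination
theorem pvRunEnd_ge (col : List Int) (n j : Nat) : j ≤ pvRunEnd col n j := by
  fun_induction pvRunEnd col n j with
  | case1 j h ih => omega
  | case2 j h => omega

-- outer while of B over i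
def pvLoopB (col : List Int) (n i : Nat) (bloques : List Int) : List Int :=
  if i < n then
    if col.getD i 0 = 1 then
      let j := pvRunEnd col n i
      pvLoopB col n j (bloques ++ [(j : Int) - (i : Int)])
    else pvLoopB col n (i + 1) bloques
  else bloques
  termination_by n - i
  decreasing_by
  · have h2 : pvRunEnd col n i = pvRunEnd col n (i + 1) := by
      rw [pvRunEnd.eq_def, if_pos (And.intro ‹i < n› ‹col.getD i 0 = 1›)]
    have h1 : i + 1 ≤ pvRunEnd col n (i + 1) := pvRunEnd_ge col n (i + 1)
    omega
  · omega

def calcular_pistas_columnas_alt (matriz : List (List Int)) : List (List Int) :=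
  (pvZipStar matriz).map (fun col =>
    let bloques := pvLoopB col col.length 0 []
    if bloques = [] then [0] else bloques)

-- ===== PRECONDITION & SPEC =====
-- Pre_ excludes exactly the inputs on which Python A raises IndexError:
-- the empty matrix (matriz[0]) and matrices with a row shorter than row 0 (matriz[i][j]).
def Pre_calcular_pistas_columnas (matriz : List (List Int)) : Prop :=
  matriz ≠ [] ∧ ∀ r ∈ matriz, (matriz.headI).length ≤ r.length
instance (matriz : List (List Int)) : Decidable (Pre_calcular_pistas_columnas matriz) := by
  unfold Pre_calcular_pistas_columnas; infer_instance

def pvWitness_calcular_pistas_columnas : List (List Int) := [[1, 0], [1, 1], [0, 1]]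

def Spec_calcular_pistas_columnas (matriz : List (List Int)) (out : List (List Int)) : Prop := out = calcular_pistas_columnas_alt matriz
instance (matriz : List (List Int)) (out : List (List Int)) : Decidable (Spec_calcular_pistas_columnas matriz out) := by unfold Spec_calcular_pistas_columnas; infer_instance

-- ===== CLAIM (what is proved, stated in full; the proofs are below) =====
def Claim_equal_calcular_pistas_columnas : Prop := ∀ (matriz : List (List Int)), Dom_calcular_pistas_columnas matriz → Pre_calcular_pistas_columnas matriz → Spec_calcular_pistas_columnas matriz (calcular_pistas_columnas matriz)

-- ===== LEMMAS AND PROOFS =====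

-- common reference: the clue list of one column, given an open run of length c
def pvRunsFrom (c : Int) : List Int → List Int
  | [] => if 0 < c then [c] else []
  | v :: vs => if v = 1 then pvRunsFrom (c + 1) vs else (if 0 < c then [c] else []) ++ pvRunsFrom 0 vs

-- A's inner fold over the rows, followed by the flush, = pvRunsFrom of the column
theorem pvFoldA_runs (k : Nat) (matriz : List (List Int)) : ∀ (acc : List Int) (c : Int), 0 ≤ c →
    (let st := matriz.foldl (fun (st : List Int × Int) row =>
        if row.getD k 0 = 1 then (st.1, st.2 + 1)
        else if st.2 > 0 then (st.1 ++ [st.2], 0) else st) (acc, c)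
     if st.2 > 0 then st.1 ++ [st.2] else st.1)
    = acc ++ pvRunsFrom c (matriz.map (fun row => row.getD k 0)) := by
  induction matriz with
  | nil => intro acc c _; by_cases h : 0 < c <;> simp [pvRunsFrom, h]
  | cons r rows ih =>
    intro acc c hc0
    simp only [List.foldl_cons, List.map_cons, pvRunsFrom]
    by_cases hv : r.getD k 0 = 1
    · rw [if_pos hv, if_pos hv]
      exact ih acc (c + 1) (by omega)
    · rw [if_neg hv, if_neg hv]
      by_cases hc : c > 0
      · rw [if_pos hc, if_pos hc]
        rw [ih (acc ++ [c]) 0 le_rfl]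
        simp
      · have hc' : c = 0 := by omega
        subst hc'
        rw [if_neg hc, if_neg hc]
        rw [ih acc 0 le_rfl]
        simp

theorem pvRunEnd_stop (col : List Int) (n j : Nat) :
    ¬ (pvRunEnd col n j < n ∧ col.getD (pvRunEnd col n j) 0 = 1) := by
  fun_induction pvRunEnd col n j with
  | case1 j h ih => exact ih
  | case2 j h => exact h

-- skipping a run of 1s shifts the open counter
theorem pvRunsFrom_runEnd (col : List Int) (j : Nat) (k : Int) :
    pvRunsFrom k (col.drop j)
      = pvRunsFrom (k + ((pvRunEnd col col.length j : Int) - (j : Int)))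
          (col.drop (pvRunEnd col col.length j)) := by
  fun_induction pvRunEnd col col.length j generalizing k with
  | case1 j h ih =>
    obtain ⟨hj, hv⟩ := h
    have hdrop : col.drop j = col[j] :: col.drop (j + 1) := List.drop_eq_getElem_cons hj
    have hv' : col[j] = 1 := by rwa [List.getD_eq_getElem col 0 hj] at hv
    rw [hdrop, pvRunsFrom, if_pos hv', ih (k + 1)]
    congr 1
    omega
  | case2 j h => simp

-- a closed run of positive length followed by a non-1 (or nothing) is one block
theorem pvRunsFrom_pos_break (k : Int) (hk : 0 < k) (l : List Int)
    (hl : l.head?.getD 0 ≠ 1) : pvRunsFrom k l = k :: pvRunsFrom 0 l := by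
  cases l with
  | nil => simp [pvRunsFrom, hk]
  | cons v vs =>
    have hv : v ≠ 1 := by simpa using hl
    simp [pvRunsFrom, hv, hk]

theorem pvLoopB_runs (col : List Int) (i : Nat) (acc : List Int) :
    pvLoopB col col.length i acc = acc ++ pvRunsFrom 0 (col.drop i) := by
  fun_induction pvLoopB col col.length i acc with
  | case1 i acc hin hv j ih =>
    have hjdef : j = pvRunEnd col col.length i := rfl
    have hstop := pvRunEnd_stop col col.length i
    have hgt : i < pvRunEnd col col.length i := by
      have h2 : pvRunEnd col col.length i = pvRunEnd col col.length (i + 1) := by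
        rw [pvRunEnd.eq_def, if_pos (And.intro hin hv)]
      have h1 := pvRunEnd_ge col col.length (i + 1)
      omega
    rw [ih]
    have hrr := pvRunsFrom_runEnd col i (0 : Int)
    rw [← hjdef] at hrr hstop
    rw [← hjdef] at hgt
    have hbreak : pvRunsFrom ((j : Int) - (i : Int)) (col.drop j)
        = ((j : Int) - (i : Int)) :: pvRunsFrom 0 (col.drop j) := by
      apply pvRunsFrom_pos_break _ (by omega)
      by_cases hjlt : j < col.length
      · rw [List.drop_eq_getElem_cons hjlt]
        simp only [List.head?_cons, Option.getD_some]
        intro h1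
        exact hstop ⟨hjlt, by rw [List.getD_eq_getElem col 0 hjlt]; exact h1⟩
      · rw [List.drop_eq_nil_of_le (by omega)]
        simp
    rw [hrr]
    simp only [zero_add]
    rw [hbreak]
    simp
  | case2 i acc hin hv ih =>
    have hdrop : col.drop i = col[i] :: col.drop (i + 1) := List.drop_eq_getElem_cons hin
    have hvne : col[i] ≠ 1 := by rwa [List.getD_eq_getElem col 0 hin] at hv
    rw [ih, hdrop, pvRunsFrom, if_neg hvne]
    simp
  | case3 i acc hin =>
    have : col.drop i = [] := List.drop_eq_nil_of_le (by omega)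
    simp [this, pvRunsFrom]

theorem pvFoldlMin_eq (m : Nat) (l : List (List Int)) (h : ∀ x ∈ l, m ≤ x.length) :
    l.foldl (fun a row => min a row.length) m = m := by
  induction l generalizing m with
  | nil => rfl
  | cons x xs ih =>
    have hx : m ≤ x.length := h x (by simp)
    simp only [List.foldl_cons, Nat.min_eq_left hx]
    exact ih m (fun y hy => h y (by simp [hy]))

-- one column, A's way = one column, B's way (any matrix, any column index)
theorem pvColumn_eq (matriz : List (List Int)) (k : Nat) :
    (let st := (PySem.List.pyRange 0 (matriz.length : Int) 1).foldl (fun (st : List Int × Int) indice_fila =>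
        if PySem.List.pyGetD (PySem.List.pyGetD matriz indice_fila []) (k : Int) 0 = 1 then (st.1, st.2 + 1)
        else if st.2 > 0 then (st.1 ++ [st.2], 0) else st) ([], 0)
     let conteos := if st.2 > 0 then st.1 ++ [st.2] else st.1
     if conteos.length = 0 then conteos ++ [0] else conteos)
    = (let col := matriz.map (fun row => row.getD k 0)
       let bloques := pvLoopB col col.length 0 []
       if bloques = [] then [0] else bloques) := by
  have hinner :
      (PySem.List.pyRange 0 (matriz.length : Int) 1).foldl (fun (st : List Int × Int) indice_fila =>
        if PySem.List.pyGetD (PySem.List.pyGetD matriz indice_fila []) (k : Int) 0 = 1 then (st.1, st.2 + 1)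
        else if st.2 > 0 then (st.1 ++ [st.2], 0) else st) ([], 0)
      = matriz.foldl (fun (st : List Int × Int) row =>
        if PySem.List.pyGetD row (k : Int) 0 = 1 then (st.1, st.2 + 1)
        else if st.2 > 0 then (st.1 ++ [st.2], 0) else st) ([], 0) :=
    PySem.List.foldl_pyRange_zero_pyGetD' matriz ([] : List Int)
      (fun (st : List Int × Int) row =>
        if PySem.List.pyGetD row (k : Int) 0 = 1 then (st.1, st.2 + 1)
        else if st.2 > 0 then (st.1 ++ [st.2], 0) else st) (([], 0) : List Int × Int)
  simp only []
  rw [hinner]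
  simp only [PySem.List.pyGetD_natCast]
  have hA := pvFoldA_runs k matriz [] 0 le_rfl
  simp only [List.nil_append] at hA
  have hB := pvLoopB_runs (matriz.map (fun row => row.getD k 0)) 0 []
  simp only [List.drop_zero, List.nil_append] at hB
  rw [hA, hB]
  cases pvRunsFrom 0 (matriz.map (fun row => row.getD k 0)) <;> simp

-- ===== VERDICT (by name: the statement is the Claim_ definition above) =====
theorem calcular_pistas_columnas_spec : Claim_equal_calcular_pistas_columnas := by
  intro matriz _ hpre
  obtain ⟨hne, hall⟩ := hpre
  unfold Spec_calcular_pistas_columnas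
  cases matriz with
  | nil => exact absurd rfl hne
  | cons r rs =>
    simp only [List.headI] at hall
    have hmin : rs.foldl (fun m row => min m row.length) r.length = r.length :=
      pvFoldlMin_eq r.length rs (fun x hx => hall x (by simp [hx]))
    show calcular_pistas_columnas (r :: rs) = calcular_pistas_columnas_alt (r :: rs)
    rw [calcular_pistas_columnas, calcular_pistas_columnas_alt, pvZipStar]
    simp only [hmin, PySem.List.pyGetD_zero_cons]
    rw [PySem.List.foldl_append_singleton_eq_map, PySem.List.pyRange_zero_nat r.length,
      List.map_map, List.map_map]
    simp only [List.nil_append]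
    apply List.map_congr_left
    intro k _
    exact pvColumn_eq (r :: rs) k
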